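-- pv_equiv track=rewrite | github.com/KuudoAI/amazon_ads_mcp | src/amazon_ads_mcp/middleware/error_envelope.py | _hints_for_validation
-- ===== SOURCE A (Python) =====
-- from typing import Any
--
-- def _hints_for_validation(
--     details: list[dict[str, Any]],
--     schema_field_names: list[str],
-- ) -> list[str]:
--     """Generic guidance for input validation rejections.
--
--     Field-name promotion ("Required field missing: 'X'", etc.) is
--     handled by the consolidated envelope-level pass
--     :func:`_promote_field_signals_into_hints` so it fires regardless of
--     which classifier built the envelope. This helper only contributes
--     the generic baseline plus the "Did you mean 'Y'?" suggestion when
--     schema field names are known (the suggestion needs schema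
--     introspection that the envelope-level pass doesn't have access to).
--     """
--     specific: list[str] = []
--     if schema_field_names:
--         for entry in details:
--             if not isinstance(entry, dict):
--                 continue
--             path = str(entry.get("path") or "").strip()
--             issue_text = str(entry.get("issue") or "").lower()
--             if not path:
--                 continue
--             if (
--                 "extra" in issue_text
--                 or "unexpected" in issue_text
--                 or "not permitted" in issue_text
--                 or "forbidden" in issue_text
--             ):
--                 suggestion = _did_you_mean(path, schema_field_names)
--                 if suggestion:
--                     specific.append(
--                         f"Unknown field '{path}'. Did you mean '{suggestion}'?"
--                     )
--
--     fallback = [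
--         "Check required fields and input types in the tool schema.",
--         "Use canonical schema field names (e.g., camelCase for v2/v3 endpoints).",
--     ]
--     return specific + fallback if specific else fallback
--
-- def _did_you_mean(needle: str, haystack: list[str]) -> str | None:
--     """Return the closest canonical name in ``haystack`` within Levenshtein
--     distance 2, or None when no good match exists.
--
--     Comparisons are case-insensitive so PascalCase typos suggest the
--     camelCase canonical (and vice-versa).
--     """
--     if not needle or not haystack:
--         return None
--     target = needle.lower()
--     best: tuple[int, str] | None = None
--     for candidate in haystack:
--         d = _levenshtein(target, candidate.lower())
--         if d > 2:
--             continue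
--         if best is None or d < best[0]:
--             best = (d, candidate)
--     return best[1] if best else None
--
-- def _levenshtein(a: str, b: str) -> int:
--     """Iterative Levenshtein distance with O(min(len)) memory."""
--     if a == b:
--         return 0
--     if len(a) > len(b):
--         a, b = b, a
--     if not a:
--         return len(b)
--     prev = list(range(len(a) + 1))
--     for i, cb in enumerate(b, start=1):
--         curr = [i]
--         for j, ca in enumerate(a, start=1):
--             ins = curr[j - 1] + 1
--             dele = prev[j] + 1
--             sub = prev[j - 1] + (0 if ca == cb else 1)
--             curr.append(min(ins, dele, sub))
--         prev = curr
--     return prev[-1]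
-- ===== SOURCE B (Python) =====
-- from typing import Any
--
--
-- def _hints_for_validation(
--     details: list[dict[str, Any]],
--     schema_field_names: list[str],
-- ) -> list[str]:
--     """Same hints, but 'Did you mean' uses a depth-bounded edit search
--     (cutoff 2) instead of a full Levenshtein matrix per candidate."""
--     fallback = [
--         "Check required fields and input types in the tool schema.",
--         "Use canonical schema field names (e.g., camelCase for v2/v3 endpoints).",
--     ]
--     if not schema_field_names:
--         return list(fallback)
--
--     def hint(entry: dict[str, Any]) -> str | None:
--         if not isinstance(entry, dict):
--             return None
--         path = str(entry.get("path") or "").strip()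
--         issue = str(entry.get("issue") or "").lower()
--         if not path:
--             return None
--         if not any(w in issue for w in ("extra", "unexpected", "not permitted", "forbidden")):
--             return None
--         s = _did_you_mean(path, schema_field_names)
--         return f"Unknown field '{path}'. Did you mean '{s}'?" if s else None
--
--     specific = [h for h in map(hint, details) if h is not None]
--     return specific + fallback
--
--
-- def _did_you_mean(needle: str, haystack: list[str]) -> str | None:
--     if not needle or not haystack:
--         return None
--     target = needle.lower()
--     best: tuple[int, str] | None = None
--     for candidate in haystack:
--         d = _bounded_lev(target, candidate.lower(), 2)
--         if d is not None and (best is None or d < best[0]):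
--             best = (d, candidate)
--     return best[1] if best else None
--
--
-- def _omin(p: int | None, q: int | None) -> int | None:
--     if p is None:
--         return q
--     if q is None:
--         return p
--     return min(p, q)
--
--
-- def _blev(a: str, b: str, i: int, j: int, k: int) -> int | None:
--     """Edit distance between a[:i] and b[:j] if it is <= k, else None.
--
--     Trims the common suffix, then branches on the three edits at the
--     right end with a decremented budget.
--     """
--     while i and j and a[i - 1] == b[j - 1]:
--         i -= 1
--         j -= 1
--     if i == 0:
--         return j if j <= k else None
--     if j == 0:
--         return i if i <= k else None
--     if k == 0:
--         return None
--     r = _omin(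
--         _omin(_blev(a, b, i - 1, j, k - 1), _blev(a, b, i, j - 1, k - 1)),
--         _blev(a, b, i - 1, j - 1, k - 1),
--     )
--     return None if r is None else r + 1
--
--
-- def _bounded_lev(a: str, b: str, k: int) -> int | None:
--     return _blev(a, b, len(a), len(b), k)
-- ===== Notes on version B (the rewrite author's own statement) =====
-- stated objective: alternative
-- what changed: The 'Did you mean' suggestion replaces the full Levenshtein DP matrix per candidate with a depth-bounded edit search (budget 2) that trims the common suffix and branches on the three right-end edits; the hint list is built with a filter-map instead of an accumulator loop.
import Mathlib
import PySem

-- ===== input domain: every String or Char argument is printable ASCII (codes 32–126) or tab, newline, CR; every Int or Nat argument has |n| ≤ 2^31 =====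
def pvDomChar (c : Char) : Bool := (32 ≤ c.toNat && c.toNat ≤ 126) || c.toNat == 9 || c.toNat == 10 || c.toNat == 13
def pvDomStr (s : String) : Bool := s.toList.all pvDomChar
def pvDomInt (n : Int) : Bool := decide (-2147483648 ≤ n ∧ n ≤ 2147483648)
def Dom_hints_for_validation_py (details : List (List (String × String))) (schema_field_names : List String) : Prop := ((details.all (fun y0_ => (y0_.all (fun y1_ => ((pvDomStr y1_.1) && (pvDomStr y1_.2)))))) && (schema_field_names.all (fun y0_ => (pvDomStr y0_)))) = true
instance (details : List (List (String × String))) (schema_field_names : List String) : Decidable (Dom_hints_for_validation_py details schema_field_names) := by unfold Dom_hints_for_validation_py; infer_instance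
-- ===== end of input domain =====

-- B replaces A's full Levenshtein DP matrix per candidate by a depth-bounded
-- (budget 2) suffix-trimming edit search: objective 'alternative' (a genuinely different algorithm).

-- ===== PORT A =====

-- inner loop body of _levenshtein: 'for j, ca in enumerate(a, start=1)', state (j, curr)
-- (curr[j-1] / prev[j] / prev[j-1] are always in range, so getD is exact here)
def levA_inner (prev : List Nat) (cb : Char) (st : Nat × List Nat) (ca : Char) : Nat × List Nat :=
  let j := st.1
  let curr := st.2
  let ins := curr.getD (j - 1) 0 + 1
  let dele := prev.getD j 0 + 1
  let sub := prev.getD (j - 1) 0 + (if ca = cb then 0 else 1)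
  (j + 1, curr ++ [min ins (min dele sub)])

-- outer loop body: 'for i, cb in enumerate(b, start=1)', state (i, prev)
def levA_outer (al : List Char) (st : Nat × List Nat) (cb : Char) : Nat × List Nat :=
  let i := st.1
  let prev := st.2
  let res := al.foldl (levA_inner prev cb) (1, [i])
  (i + 1, res.2)

-- port of _levenshtein (prev is never empty, so getLast?.getD 0 is exactly prev[-1])
def levA (a b : String) : Nat :=
  if a = b then 0
  else
    let p := if a.toList.length > b.toList.length then (b, a) else (a, b)
    if p.1 = "" then p.2.toList.length
    else
      let al := p.1.toList
      let bl := p.2.toList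
      let fin := bl.foldl (levA_outer al) (1, List.range (al.length + 1))
      (fin.2.getLast?).getD 0

-- port of _did_you_mean
def did_you_mean (needle : String) (haystack : List String) : Option String :=
  if needle = "" ∨ haystack = [] then none
  else
    let target := PySem.Str.lower needle
    let best := haystack.foldl (fun (best : Option (Nat × String)) candidate =>
      let d := levA target (PySem.Str.lower candidate)
      if d > 2 then best
      else
        match best with
        | none => some (d, candidate)
        | some b => if d < b.1 then some (d, candidate) else best) none
    best.map (·.2)

-- loop body of _hints_for_validation ('if suggestion:' is false for None and for "")
def hintStepA (schema_field_names : List String) (acc : List String) (entry : List (String × String)) : List String :=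
  let path := PySem.Str.strip (((PySem.Dict.mk entry).get? "path").getD "")
  let issue_text := PySem.Str.lower (((PySem.Dict.mk entry).get? "issue").getD "")
  if path = "" then acc
  else if PySem.Str.isIn "extra" issue_text || PySem.Str.isIn "unexpected" issue_text
       || PySem.Str.isIn "not permitted" issue_text || PySem.Str.isIn "forbidden" issue_text then
    match did_you_mean path schema_field_names with
    | some suggestion =>
        if suggestion = "" then acc
        else acc ++ ["Unknown field '" ++ path ++ "'. Did you mean '" ++ suggestion ++ "'?"]
    | none => acc
  else acc

def hints_for_validation_py (details : List (List (String × String))) (schema_field_names : List String) : List String :=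
  let specific :=
    if schema_field_names = [] then []
    else details.foldl (hintStepA schema_field_names) []
  let fallback := ["Check required fields and input types in the tool schema.",
                   "Use canonical schema field names (e.g., camelCase for v2/v3 endpoints)."]
  if specific = [] then fallback else specific ++ fallback

-- ===== PORT B =====

-- port of _omin
def omin : Option Nat → Option Nat → Option Nat
  | none, q => q
  | some p, none => some p
  | some p, some q => some (min p q)

-- port of _blev: the pair of indices (i, j) into fixed (a, b) names the prefix pair
-- (a[:i], b[:j]); here that prefix pair is carried as the two REVERSED-prefix char
-- lists, so 'i -= 1' / recursing at i-1 is peeling the head, a[i-1] is the head.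
def blev : List Char → List Char → Nat → Option Nat
  | x :: xs, y :: ys, k =>
    if x = y then blev xs ys k          -- the suffix-trimming while loop
    else match k with
      | 0 => none
      | k' + 1 =>
        match omin (omin (blev xs (y :: ys) k') (blev (x :: xs) ys k')) (blev xs ys k') with
        | none => none
        | some r => some (r + 1)
  | [], b, k => if b.length ≤ k then some b.length else none
  | a, [], k => if a.length ≤ k then some a.length else none
termination_by a b _ => a.length + b.length

-- port of _bounded_lev (i = len(a), j = len(b): the reversed whole strings)
def bounded_lev (a b : String) (k : Nat) : Option Nat :=
  blev a.toList.reverse b.toList.reverse k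

-- port of B's _did_you_mean
def did_you_mean_alt (needle : String) (haystack : List String) : Option String :=
  if needle = "" ∨ haystack = [] then none
  else
    let target := PySem.Str.lower needle
    let best := haystack.foldl (fun (best : Option (Nat × String)) candidate =>
      match bounded_lev target (PySem.Str.lower candidate) 2, best with
      | some d, none => some (d, candidate)
      | some d, some b => if d < b.1 then some (d, candidate) else some b
      | none, b => b) none
    best.map (·.2)

-- port of B's 'hint' helper ('f"…" if s else None': "" gives None)
def hintB (schema_field_names : List String) (entry : List (String × String)) : Option String :=
  let path := PySem.Str.strip (((PySem.Dict.mk entry).get? "path").getD "")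
  let issue := PySem.Str.lower (((PySem.Dict.mk entry).get? "issue").getD "")
  if path = "" then none
  else if !(["extra", "unexpected", "not permitted", "forbidden"].any
              (fun w => PySem.Str.isIn w issue)) then none
  else
    match did_you_mean_alt path schema_field_names with
    | some s =>
        if s = "" then none
        else some ("Unknown field '" ++ path ++ "'. Did you mean '" ++ s ++ "'?")
    | none => none

def hints_for_validation_py_alt (details : List (List (String × String))) (schema_field_names : List String) : List String :=
  let fallback := ["Check required fields and input types in the tool schema.",
                   "Use canonical schema field names (e.g., camelCase for v2/v3 endpoints)."]
  if schema_field_names = [] then fallback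
  else (details.filterMap (hintB schema_field_names)) ++ fallback

-- ===== PRECONDITION & SPEC =====
def Spec_hints_for_validation_py (details : List (List (String × String))) (schema_field_names : List String) (out : List String) : Prop := out = hints_for_validation_py_alt details schema_field_names
instance (details : List (List (String × String))) (schema_field_names : List String) (out : List String) : Decidable (Spec_hints_for_validation_py details schema_field_names out) := by unfold Spec_hints_for_validation_py; infer_instance

-- ===== CLAIM (what is proved, stated in full; the proofs are below) =====
def Claim_equal_hints_for_validation_py : Prop := ∀ (details : List (List (String × String))) (schema_field_names : List String), Dom_hints_for_validation_py details schema_field_names → Spec_hints_for_validation_py details schema_field_names (hints_for_validation_py details schema_field_names)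

-- ===== LEMMAS AND PROOFS =====

def lev : List Char → List Char → Nat
  | [], ys => ys.length
  | x :: xs, [] => (x :: xs).length
  | x :: xs, y :: ys =>
      min (lev xs (y :: ys) + 1) (min (lev (x :: xs) ys + 1) (lev xs ys + if x = y then 0 else 1))
termination_by a b => a.length + b.length

theorem lev_cons_cons (x y : Char) (xs ys : List Char) :
    lev (x :: xs) (y :: ys)
      = min (lev xs (y :: ys) + 1) (min (lev (x :: xs) ys + 1) (lev xs ys + if x = y then 0 else 1)) := by
  rw [lev]

theorem lev_nil_right (a : List Char) : lev a [] = a.length := by cases a <;> simp [lev]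

theorem lev_len_bound (xs ys : List Char) :
    xs.length ≤ lev xs ys + ys.length ∧ ys.length ≤ lev xs ys + xs.length := by
  fun_induction lev xs ys with
  | case1 => simp
  | case2 => simp
  | case3 x xs y ys ih1 ih2 ih3 => simp_all; omega

theorem lev_comm (xs ys : List Char) : lev xs ys = lev ys xs := by
  fun_induction lev xs ys with
  | case1 ys => rw [lev_nil_right]
  | case2 => simp [lev]
  | case3 x xs y ys ih1 ih2 ih3 =>
      rw [lev_cons_cons y x ys xs]
      have hc : (if x = y then (0:Nat) else 1) = (if y = x then 0 else 1) := by
        by_cases h : x = y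
        · simp [h]
        · rw [if_neg h, if_neg (fun hh => h hh.symm)]
      rw [ih1, ih2, ih3, hc]
      omega

theorem lev_le_cons (xs ys : List Char) :
    (∀ y : Char, lev xs ys ≤ lev xs (y :: ys) + 1) ∧
    (∀ x : Char, lev xs ys ≤ lev (x :: xs) ys + 1) := by
  fun_induction lev xs ys with
  | case1 ys =>
      constructor <;> intro c
      · simp [lev]
        omega
      · have h := (lev_len_bound [c] ys).2
        simp only [List.length_cons, List.length_nil] at h
        omega
  | case2 x xs =>
      constructor <;> intro c
      · rw [lev_cons_cons]
        have h1 := (lev_len_bound xs [c]).1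
        have h2 := lev_nil_right xs
        have h3 := lev_nil_right (x :: xs)
        rw [h2, h3]
        simp only [List.length_cons, List.length_nil] at h1 h3 ⊢
        omega
      · have h3 := lev_nil_right (x :: xs)
        have h4 := lev_nil_right (c :: x :: xs)
        rw [h4]
        simp only [List.length_cons]
        omega
  | case3 x xs y ys ih1 ih2 ih3 =>
      constructor <;> intro c
      · rw [lev_cons_cons x c xs (y :: ys), lev_cons_cons x y xs ys]
        have h1 := ih1.1 c
        omega
      · rw [lev_cons_cons c y (x :: xs) ys, lev_cons_cons x y xs ys]
        have h2 := ih2.2 c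
        omega

theorem lev_cons_eq (x : Char) (xs ys : List Char) : lev (x :: xs) (x :: ys) = lev xs ys := by
  rw [lev_cons_cons]
  have h1 := (lev_le_cons xs ys).1 x
  have h2 := (lev_le_cons xs ys).2 x
  simp
  omega

theorem lev_self (a : List Char) : lev a a = 0 := by
  induction a with
  | nil => simp [lev]
  | cons x xs ih => simp [lev, ih]

theorem blev_spec (a b : List Char) (k : Nat) :
    blev a b k = if lev a b ≤ k then some (lev a b) else none := by
  fun_induction blev a b k with
  | case1 xs x ys k ih => rw [lev_cons_eq]; exact ih
  | case2 x xs y ys hne =>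
      have hl := lev_cons_cons x y xs ys
      rw [if_neg hne] at hl
      rw [hl]
      split
      · next hc => exfalso; omega
      · rfl
  | case3 x xs y ys hne k' homin ihA ihB ihC =>
      have hl := lev_cons_cons x y xs ys
      rw [if_neg hne] at hl
      rw [ihA, ihB, ihC] at homin
      rw [hl]
      split_ifs at homin with hA hB hC <;> simp [omin] at homin
      all_goals
        split
        · next hc => exfalso; omega
        · rfl
  | case4 x xs y ys hne k' r homin ihA ihB ihC =>
      have hl := lev_cons_cons x y xs ys
      rw [if_neg hne] at hl
      rw [ihA, ihB, ihC] at homin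
      rw [hl]
      split_ifs at homin with hA hB hC <;> simp [omin] at homin <;>
        (split
         · simp only [Option.some.injEq]; omega
         · exfalso; omega)
  | case5 b k h => simp [lev, h]
  | case6 b k h => simp [lev, h]
  | case7 a k hne h => rw [lev_nil_right]; simp [h]
  | case8 a k hne h => rw [lev_nil_right]; simp [h]

def Lrow (al q : List Char) (j : Nat) : Nat := lev ((al.take j).reverse) q

def rowF (al q : List Char) : List Nat := (List.range (al.length + 1)).map (Lrow al q)

theorem getD_map_range' (f : Nat → Nat) (n j : Nat) (h : j ≤ n) :
    ((List.range (n + 1)).map f).getD j 0 = f j := by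
  rw [List.getD_eq_getElem?_getD, List.getElem?_map, List.getElem?_range (by omega)]
  rfl

theorem inner_inv (al p : List Char) (cb : Char) :
    ∀ todo done : List Char, al = done ++ todo →
      todo.foldl (levA_inner (rowF al p.reverse) cb)
          (done.length + 1, (List.range (done.length + 1)).map (Lrow al (cb :: p.reverse)))
        = (al.length + 1, rowF al (cb :: p.reverse)) := by
  intro todo
  induction todo with
  | nil => intro done h; subst h; simp [rowF]
  | cons ca todo' ih =>
      intro done h
      rw [List.foldl_cons]
      have hlen : done.length + 1 ≤ al.length := by
        subst h; simp
      have hstep : levA_inner (rowF al p.reverse) cb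
            (done.length + 1, (List.range (done.length + 1)).map (Lrow al (cb :: p.reverse))) ca
          = (done.length + 1 + 1, (List.range (done.length + 1 + 1)).map (Lrow al (cb :: p.reverse))) := by
        unfold levA_inner rowF
        simp only []
        have e1 : ((List.range (done.length + 1)).map (Lrow al (cb :: p.reverse))).getD (done.length + 1 - 1) 0
            = Lrow al (cb :: p.reverse) done.length := by
          rw [Nat.add_sub_cancel]; exact getD_map_range' _ _ _ (by omega)
        have e2 : ((List.range (al.length + 1)).map (Lrow al p.reverse)).getD (done.length + 1) 0
            = Lrow al p.reverse (done.length + 1) := by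
          exact getD_map_range' _ _ _ hlen
        have e3 : ((List.range (al.length + 1)).map (Lrow al p.reverse)).getD (done.length + 1 - 1) 0
            = Lrow al p.reverse done.length := by
          rw [Nat.add_sub_cancel]; exact getD_map_range' _ _ _ (by omega)
        rw [e1, e2, e3]
        have htake : al.take done.length = done := by
          subst h; exact List.take_left
        have htake1 : al.take (done.length + 1) = done ++ [ca] := by
          subst h
          rw [List.take_append]
          simp
        have hrec : Lrow al (cb :: p.reverse) (done.length + 1)
            = min (Lrow al (cb :: p.reverse) done.length + 1)
                (min (Lrow al p.reverse (done.length + 1) + 1)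
                  (Lrow al p.reverse done.length + if ca = cb then 0 else 1)) := by
          unfold Lrow
          rw [htake, htake1, List.reverse_append]
          simp only [List.reverse_cons, List.reverse_nil, List.nil_append, List.singleton_append]
          rw [lev_cons_cons]
        rw [List.range_succ (n := done.length + 1), List.map_append]
        simp only [List.map_cons, List.map_nil]
        rw [hrec]
      rw [hstep]
      have := ih (done ++ [ca]) (by rw [h, List.append_assoc]; rfl)
      simpa [List.length_append] using this

theorem rowF_nil (al : List Char) : rowF al ([] : List Char).reverse = List.range (al.length + 1) := by
  unfold rowF
  rw [show ([] : List Char).reverse = [] from rfl]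
  have : ∀ j ∈ List.range (al.length + 1), Lrow al [] j = j := by
    intro j hj
    rw [List.mem_range] at hj
    unfold Lrow
    rw [lev_nil_right]
    simp
    omega
  rw [List.map_congr_left this, List.map_id']

theorem outer_inv (al : List Char) :
    ∀ (todo p : List Char),
      todo.foldl (levA_outer al) (p.length + 1, rowF al p.reverse)
        = (p.length + todo.length + 1, rowF al (p ++ todo).reverse) := by
  intro todo
  induction todo with
  | nil => intro p; simp
  | cons cb todo' ih =>
      intro p
      rw [List.foldl_cons]
      have hstep : levA_outer al (p.length + 1, rowF al p.reverse) cb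
          = (p.length + 1 + 1, rowF al (cb :: p.reverse)) := by
        unfold levA_outer
        simp only []
        have hinit : ([p.length + 1] : List Nat)
            = (List.range (0 + 1)).map (Lrow al (cb :: p.reverse)) := by
          simp [Lrow, lev]
        have := inner_inv al p cb al [] rfl
        simp only [List.length_nil] at this
        rw [hinit, this]
      rw [hstep]
      have h2 : (cb :: p.reverse) = (p ++ [cb]).reverse := by simp
      rw [h2]
      have := ih (p ++ [cb])
      simp only [List.length_append, List.length_cons, List.length_nil] at this ⊢
      rw [show p.length + 1 + 1 = p.length + 1 + 0 + 1 from rfl] at this ⊢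
      rw [this]
      simp only [List.append_assoc, List.singleton_append]
      ring_nf

theorem dp_eq (al bl : List Char) :
    (((bl.foldl (levA_outer al) (1, List.range (al.length + 1))).2).getLast?).getD 0
      = lev al.reverse bl.reverse := by
  have h0 : (1, List.range (al.length + 1))
      = ((([] : List Char)).length + 1, rowF al ([] : List Char).reverse) := by
    rw [rowF_nil]; rfl
  rw [h0, outer_inv al bl []]
  simp only [List.nil_append]
  unfold rowF
  rw [List.range_succ, List.map_append]
  simp only [List.map_cons, List.map_nil]
  rw [List.getLast?_concat]
  unfold Lrow
  rw [List.take_length]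
  rfl

theorem levA_eq (a b : String) : levA a b = lev a.toList.reverse b.toList.reverse := by
  unfold levA
  by_cases hab : a = b
  · subst hab; rw [if_pos rfl, lev_self]
  · rw [if_neg hab]
    by_cases hlen : a.toList.length > b.toList.length
    · simp only [hlen, if_true]
      by_cases hb : b = ""
      · have : b.toList = [] := by rw [hb]; rfl
        rw [if_pos hb, lev_comm, this]
        simp [lev]
      · rw [if_neg hb, dp_eq, lev_comm]
    · simp only [hlen, if_false]
      by_cases ha : a = ""
      · have : a.toList = [] := by rw [ha]; rfl
        rw [if_pos ha, this]
        simp [lev]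
      · rw [if_neg ha, dp_eq]

theorem dym_eq (needle : String) (haystack : List String) :
    did_you_mean needle haystack = did_you_mean_alt needle haystack := by
  unfold did_you_mean did_you_mean_alt
  by_cases h : needle = "" ∨ haystack = []
  · rw [if_pos h, if_pos h]
  · rw [if_neg h, if_neg h]
    simp only []
    have hf : (fun (best : Option (Nat × String)) candidate =>
        let d := levA (PySem.Str.lower needle) (PySem.Str.lower candidate)
        if d > 2 then best
        else
          match best with
          | none => some (d, candidate)
          | some b => if d < b.1 then some (d, candidate) else best)
      = (fun (best : Option (Nat × String)) candidate =>
        match bounded_lev (PySem.Str.lower needle) (PySem.Str.lower candidate) 2, best with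
        | some d, none => some (d, candidate)
        | some d, some b => if d < b.1 then some (d, candidate) else some b
        | none, b => b) := by
      funext best candidate
      rw [levA_eq]
      unfold bounded_lev
      rw [blev_spec]
      by_cases hd : lev (PySem.Str.lower needle).toList.reverse
          (PySem.Str.lower candidate).toList.reverse ≤ 2
      · rw [if_pos hd]
        simp only []
        rw [if_neg (by omega)]
        cases best with
        | none => rfl
        | some b => rfl
      · rw [if_neg hd]
        simp only []
        rw [if_pos (by omega)]
    exact congrArg (fun f => (haystack.foldl f (none : Option (Nat × String))).map (·.2)) hf

theorem step_eq (names : List String) (acc : List String) (e : List (String × String)) :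
    hintStepA names acc e = acc ++ (hintB names e).toList := by
  unfold hintStepA hintB
  simp only [List.any_cons, List.any_nil, Bool.or_false]
  set path := PySem.Str.strip (((PySem.Dict.mk e).get? "path").getD "") with hpath
  set issue := PySem.Str.lower (((PySem.Dict.mk e).get? "issue").getD "") with hissue
  by_cases hp : path = ""
  · simp [hp]
  · rw [if_neg hp, if_neg hp]
    by_cases hc : (PySem.Str.isIn "extra" issue || PySem.Str.isIn "unexpected" issue
       || PySem.Str.isIn "not permitted" issue || PySem.Str.isIn "forbidden" issue) = true
    · rw [if_pos hc]
      have hBf : (!(PySem.Str.isIn "extra" issue || (PySem.Str.isIn "unexpected" issue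
          || (PySem.Str.isIn "not permitted" issue || PySem.Str.isIn "forbidden" issue)))) = false := by
        rw [Bool.not_eq_false']
        simpa only [Bool.or_assoc] using hc
      rw [if_neg (by rw [hBf]; exact Bool.false_ne_true)]
      rw [dym_eq]
      cases did_you_mean_alt path names with
      | none => simp
      | some s =>
          by_cases hs : s = ""
          · simp [hs]
          · simp [hs]
    · rw [if_neg hc]
      have hBt : (!(PySem.Str.isIn "extra" issue || (PySem.Str.isIn "unexpected" issue
          || (PySem.Str.isIn "not permitted" issue || PySem.Str.isIn "forbidden" issue)))) = true := by
        rw [Bool.not_eq_true']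
        rw [Bool.not_eq_true] at hc
        simpa only [Bool.or_assoc] using hc
      rw [if_pos hBt]
      simp

theorem fold_filterMap (names : List String) (details : List (List (String × String))) :
    ∀ acc, details.foldl (hintStepA names) acc = acc ++ details.filterMap (hintB names) := by
  induction details with
  | nil => simp
  | cons e ds ih =>
      intro acc
      simp only [List.foldl_cons, List.filterMap_cons]
      rw [ih, step_eq]
      cases hintB names e <;> simp

-- ===== VERDICT (by name: the statement is the Claim_ definition above) =====
theorem hints_for_validation_py_spec : Claim_equal_hints_for_validation_py := by
  intro details names _
  unfold Spec_hints_for_validation_py hints_for_validation_py hints_for_validation_py_alt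
  by_cases h : names = []
  · simp [h]
  · simp only [h, if_false]
    rw [fold_filterMap]
    simp only [List.nil_append]
    by_cases hs : details.filterMap (hintB names) = []
    · simp [hs]
    · simp [hs]
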